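-- pv_equiv track=rewrite | github.com/denisschmidt/leetcode | leetcode/dfs bfs/1730. Shortest Path to Get Food/py/main.py | getFood
-- ===== SOURCE A (Python) =====
-- import collections
--
-- def getFood(grid):
--     n, m = len(grid), len(grid[0])
--     queue = collections.deque()
--     res = 0
--
--     for i in range(n):
--         for j in range(m):
--             if grid[i][j] == '*':
--                 queue.append([i, j])
--                 grid[i][j] = 'X'
--                 break
--         if queue:
--             break
--
--     while queue:
--         size = len(queue)
--
--         for _ in range(size):
--             i, j = queue.popleft()
--
--             for x, y in [[i + 1, j], [i - 1, j], [i, j + 1], [i, j - 1]]: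
--                 if 0 <= x < n and 0 <= y < m:
--                     if grid[x][y] == '#':
--                         return res + 1
--                     if grid[x][y] != 'X':
--                         queue.append([x, y])
--                         grid[x][y] = 'X'
--
--         res += 1
--
--     return -1
-- ===== SOURCE B (Python) =====
-- def getFood(grid):
--     # Multi-source reverse BFS: expand from all food cells at once and return the
--     # level at which the start '*' is reached.  Does not mutate grid (A marks
--     # visited cells 'X' in place); the equivalence is about the return value.
--     n, m = len(grid), len(grid[0])
--     start = None
--     for i in range(n):
--         for j in range(m):
--             if grid[i][j] == '*':
--                 start = (i, j)
--                 break
--         if start is not None: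
--             break
--     if start is None:
--         return -1
--     frontier = [(i, j) for i in range(n) for j in range(m) if grid[i][j] == '#']
--     seen = set(frontier)
--     d = 0
--     while frontier:
--         d += 1
--         nxt = []
--         for i, j in frontier:
--             for x, y in ((i + 1, j), (i - 1, j), (i, j + 1), (i, j - 1)):
--                 if 0 <= x < n and 0 <= y < m and (x, y) not in seen and grid[x][y] != 'X':
--                     if (x, y) == start:
--                         return d
--                     seen.add((x, y))
--                     nxt.append((x, y))
--         frontier = nxt
--     return -1
-- ===== Notes on version B (the rewrite author's own statement) =====
-- stated objective: alternative
-- what changed: Replaces A's forward BFS from the '*' cell (level-synchronized deque, in-place 'X' marking of the grid) with a multi-source reverse BFS that starts from ALL food cells '#' at once, expands frontier lists with a separate seen set (no grid mutation), and returns the level at which the start cell is reached; equal by path reversal in the undirected grid graph.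
-- outside the precondition, e.g. on getFood([['*', '#'], ['z']]): A returns 1, B raises IndexError
import Mathlib
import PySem

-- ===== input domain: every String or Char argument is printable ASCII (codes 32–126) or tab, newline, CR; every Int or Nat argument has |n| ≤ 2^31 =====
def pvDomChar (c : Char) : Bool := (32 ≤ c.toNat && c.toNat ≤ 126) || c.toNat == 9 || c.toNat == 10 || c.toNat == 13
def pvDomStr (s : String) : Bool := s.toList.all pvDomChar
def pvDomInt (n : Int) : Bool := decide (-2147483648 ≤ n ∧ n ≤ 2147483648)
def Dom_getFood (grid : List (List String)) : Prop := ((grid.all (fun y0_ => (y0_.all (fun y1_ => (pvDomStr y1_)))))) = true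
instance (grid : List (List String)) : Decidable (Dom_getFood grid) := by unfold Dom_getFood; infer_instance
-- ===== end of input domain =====

-- B replaces A's forward BFS from '*' (deque + in-place 'X' marking) by a multi-source reverse
-- BFS from all food cells '#'; A mutates grid in place while B does not, so the equivalence
-- proved here is about the RETURN value only.

-- ===== PORT A =====
-- shared low-level helpers: cell read, cell mark, the neighbor list, and the row-major scan
-- for the first '*' (the same scan code appears in both Pythons).

-- grid[x][y]; the getD defaults are only reached on ragged grids excluded by Pre_getFood
-- (Python raises IndexError there); 'X' makes such a cell behave as visited in both ports alike.
def cellD (g : List (List String)) (x y : Int) : String :=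
  PySem.List.pyGetD (PySem.List.pyGetD g x []) y "X"

-- grid[x][y] = 'X'; indices are checked nonnegative before use, so .toNat is exact
def mark (g : List (List String)) (x y : Int) : List (List String) :=
  g.set x.toNat ((PySem.List.pyGetD g x []).set y.toNat "X")

-- [[i+1,j],[i-1,j],[i,j+1],[i,j-1]]
def nbrs (i j : Int) : List (Int × Int) := [(i + 1, j), (i - 1, j), (i, j + 1), (i, j - 1)]

-- the start scan: first '*' in row-major order over columns 0..m-1
def findStartAux (m : Nat) : List (List String) → Int → Option (Int × Int)
  | [], _ => none
  | row :: rest, i =>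
    match (List.range m).find? (fun j => row.getD j "" == "*") with
    | some j => some (i, (j : Int))
    | none => findStartAux m rest (i + 1)

-- A's inner neighbor loop: none = found '#' (A returns res+1); some (g', app) = new grid and cells appended
def visitA (n m : Int) : List (Int × Int) → List (List String) → List (Int × Int) →
    Option (List (List String) × List (Int × Int))
  | [], g, app => some (g, app)
  | (x, y) :: rest, g, app =>
    if 0 ≤ x ∧ x < n ∧ 0 ≤ y ∧ y < m then
      if cellD g x y = "#" then none
      else if cellD g x y ≠ "X" then visitA n m rest (mark g x y) (app ++ [(x, y)])
      else visitA n m rest g app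
    else visitA n m rest g app

-- A's `while queue:` + `for _ in range(size)` pair: rem counts the pops left in the current level;
-- fuel bounds the total pops (each cell is enqueued at most once, so n*m+1 never runs out)
def loopA (n m : Int) (g : List (List String)) (q : List (Int × Int)) (rem : Nat) (res : Int)
    (fuel : Nat) : Int :=
  match rem with
  | 0 => if q.isEmpty then -1 else loopA n m g q q.length (res + 1) fuel
  | r + 1 =>
    match fuel with
    | 0 => -1
    | f + 1 =>
      match q with
      | [] => -1
      | (i, j) :: qt =>
        match visitA n m (nbrs i j) g [] with
        | none => res + 1
        | some (g', app) => loopA n m g' (qt ++ app) r res f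
termination_by 2 * fuel + (if rem = 0 then 1 else 0)
decreasing_by
  all_goals simp_all [List.isEmpty_iff]
  all_goals first | omega | (split <;> omega)

def getFood (grid : List (List String)) : Int :=
  let n : Int := grid.length
  let m : Nat := (grid.headD []).length
  match findStartAux m grid 0 with
  | none => -1
  | some (i, j) => loopA n (m : Int) (mark grid i j) [(i, j)] 1 0 (grid.length * m + 1)

-- ===== PORT B =====
-- B's eligibility test for entering a cell: in bounds and not a wall ('X'), read off the
-- ORIGINAL grid (B never mutates it)
def okf (grid : List (List String)) (n m : Nat) (c : Int × Int) : Bool :=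
  decide (0 ≤ c.1 ∧ c.1 < (n : Int) ∧ 0 ≤ c.2 ∧ c.2 < (m : Int)) && (cellD grid c.1 c.2 != "X")

-- [(i, j) for i in range(n) for j in range(m) if grid[i][j] == '#']  (indices are in range on
-- Pre_-admitted grids, so the getD defaults are never reached)
def foodsOf (grid : List (List String)) (n m : Nat) : List (Int × Int) :=
  (List.range n).flatMap (fun i =>
    ((List.range m).filter (fun j => (grid.getD i []).getD j "" == "#")).map
      (fun j => ((i : Int), (j : Int))))

-- B's inner neighbor loop over one frontier cell's candidates: none = reached the target
def gvisit (ok tgt : Int × Int → Bool) :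
    List (Int × Int) → PySem.Set (Int × Int) → List (Int × Int) →
    Option (PySem.Set (Int × Int) × List (Int × Int))
  | [], seen, acc => some (seen, acc)
  | c :: rest, seen, acc =>
    if ¬ seen.contains c ∧ ok c then
      if tgt c then none
      else gvisit ok tgt rest (PySem.Set.add seen c) (acc ++ [c])
    else gvisit ok tgt rest seen acc

-- B's `for i, j in frontier:` body: fold gvisit over the whole frontier, accumulating nxt
def glevel (ok tgt : Int × Int → Bool) :
    List (Int × Int) → PySem.Set (Int × Int) → List (Int × Int) →
    Option (PySem.Set (Int × Int) × List (Int × Int))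
  | [], seen, acc => some (seen, acc)
  | c :: rest, seen, acc =>
    match gvisit ok tgt (nbrs c.1 c.2) seen acc with
    | none => none
    | some (s', a') => glevel ok tgt rest s' a'

-- B's `while frontier:` loop; fuel = n*m+1 bounds the number of levels (each nonempty level
-- adds at least one fresh cell to seen, which the proofs below make precise)
def gbfs (ok tgt : Int × Int → Bool) (seen : PySem.Set (Int × Int))
    (frontier : List (Int × Int)) (d : Int) (fuel : Nat) : Int :=
  if frontier.isEmpty then -1
  else
    match fuel with
    | 0 => -1
    | f + 1 =>
      match glevel ok tgt frontier seen [] with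
      | none => d + 1
      | some (s', nxt) => gbfs ok tgt s' nxt (d + 1) f

def getFood_alt (grid : List (List String)) : Int :=
  let n : Nat := grid.length
  let m : Nat := (grid.headD []).length
  match findStartAux m grid 0 with
  | none => -1
  | some s =>
    let foods := foodsOf grid n m
    gbfs (okf grid n m) (fun c => decide (c = s)) (PySem.Set.ofList foods) foods 0 (n * m + 1)

-- ===== PRECONDITION & SPEC =====
-- Pre_ excludes the empty grid (grid[0] raises IndexError) and grids with a row shorter than the
-- first row (both programs index columns 0..m-1 of rows, which can raise IndexError; on a few
-- such grids A happens to return before touching the short row while B's full food scan raises —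
-- see the cited example).
def Pre_getFood (grid : List (List String)) : Prop :=
  grid ≠ [] ∧ ∀ row ∈ grid, (grid.headD []).length ≤ row.length
instance (grid : List (List String)) : Decidable (Pre_getFood grid) := by
  unfold Pre_getFood; infer_instance

def pvWitness_getFood : List (List String) := [["*", " "], ["#", " "]]

def Spec_getFood (grid : List (List String)) (out : Int) : Prop := out = getFood_alt grid
instance (grid : List (List String)) (out : Int) : Decidable (Spec_getFood grid out) := by
  unfold Spec_getFood; infer_instance

-- ===== CLAIM (what is proved, stated in full; the proofs are below) =====
def Claim_equal_getFood : Prop :=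
  ∀ (grid : List (List String)), Dom_getFood grid → Pre_getFood grid →
    Spec_getFood grid (getFood grid)

-- ===== LEMMAS AND PROOFS =====

-- ---------- abstract reachability for a generic BFS (ok, tgt, sources S0) ----------

-- cells reachable in exactly k expansion steps from S0: each step enters a cell that is ok,
-- not a target and not a source
def PReach (ok tgt : Int × Int → Bool) (S0 : List (Int × Int)) : Nat → Int × Int → Prop
  | 0, c => c ∈ S0
  | k + 1, c => ok c = true ∧ tgt c = false ∧ c ∉ S0 ∧
      ∃ c', PReach ok tgt S0 k c' ∧ c ∈ nbrs c'.1 c'.2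

-- a solution at depth d: a d-step reachable cell with an eligible target neighbor
def GSol (ok tgt : Int × Int → Bool) (S0 : List (Int × Int)) (d : Nat) : Prop :=
  ∃ c' c, PReach ok tgt S0 d c' ∧ c ∈ nbrs c'.1 c'.2 ∧ ok c = true ∧ tgt c = true

-- the value a (correct) BFS returns, phrased relationally
def LeastSpec (Q : Nat → Prop) (v : Int) : Prop :=
  (∃ d, Q d ∧ (∀ j < d, ¬ Q j) ∧ v = (d : Int) + 1) ∨ ((∀ d, ¬ Q d) ∧ v = -1)

lemma LeastSpec_unique {Q : Nat → Prop} {v w : Int}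
    (hv : LeastSpec Q v) (hw : LeastSpec Q w) : v = w := by
  rcases hv with ⟨d, hd, hmin, rfl⟩ | ⟨hnone, rfl⟩ <;>
    rcases hw with ⟨e, he, hemin, rfl⟩ | ⟨hnone', rfl⟩
  · have : d = e := by
      rcases lt_trichotomy d e with h | h | h
      · exact absurd hd (hemin _ h)
      · exact h
      · exact absurd he (hmin _ h)
    simp [this]
  · exact absurd hd (hnone' d)
  · exact absurd he (hnone e)
  · rfl

lemma LeastSpec_congr {Q R : Nat → Prop} (h : ∀ d, Q d ↔ R d) {v : Int}
    (hv : LeastSpec Q v) : LeastSpec R v := by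
  rcases hv with ⟨d, hd, hmin, rfl⟩ | ⟨hnone, rfl⟩
  · exact Or.inl ⟨d, (h d).1 hd, fun j hj hR => hmin j hj ((h j).2 hR), rfl⟩
  · exact Or.inr ⟨fun d hR => hnone d ((h d).2 hR), rfl⟩

-- ---------- characterization of gvisit / glevel ----------

lemma contains_true_iff {s : List (Int × Int)} {x : Int × Int} :
    PySem.Set.contains s x = true ↔ x ∈ s := by
  simp

lemma contains_false_iff {s : List (Int × Int)} {x : Int × Int} :
    PySem.Set.contains s x = false ↔ x ∉ s := by
  simp

lemma contains_append_false {s t : List (Int × Int)} {x : Int × Int} :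
    PySem.Set.contains (s ++ t) x = false ↔ PySem.Set.contains s x = false ∧ x ∉ t := by
  simp

lemma gvisit_none_iff (ok tgt : Int × Int → Bool) :
    ∀ (cs : List (Int × Int)) (seen : PySem.Set (Int × Int)) (acc : List (Int × Int)),
      gvisit ok tgt cs seen acc = none ↔
        ∃ c ∈ cs, seen.contains c = false ∧ ok c = true ∧ tgt c = true := by
  intro cs
  induction cs with
  | nil => intro seen acc; simp [gvisit]
  | cons c rest ih =>
    intro seen acc
    simp only [gvisit]
    by_cases h1 : (¬ seen.contains c = true) ∧ ok c = true
    · rw [if_pos h1]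
      by_cases h2 : tgt c = true
      · rw [if_pos h2]
        constructor
        · intro _
          exact ⟨c, List.mem_cons_self, by simpa using h1.1, h1.2, h2⟩
        · intro _; rfl
      · rw [if_neg h2]
        have h2' : tgt c = false := by simpa using h2
        have hadd : PySem.Set.add seen c = seen ++ [c] := by
          simp [PySem.Set.add]; simpa using h1.1
        rw [ih]
        constructor
        · rintro ⟨x, hx, hcx, hokx, htx⟩
          refine ⟨x, List.mem_cons_of_mem _ hx, ?_, hokx, htx⟩
          rw [hadd] at hcx; simp at hcx ⊢; exact hcx.1
        · rintro ⟨x, hx, hcx, hokx, htx⟩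
          rcases List.mem_cons.1 hx with rfl | hx
          · exact absurd htx (by simp [h2'])
          · refine ⟨x, hx, ?_, hokx, htx⟩
            rw [hadd]; simp at hcx ⊢
            refine ⟨hcx, ?_⟩
            rintro rfl; rw [h2'] at htx; exact Bool.false_ne_true htx
    · rw [if_neg h1]
      rw [ih]
      constructor
      · rintro ⟨x, hx, hcx, hokx, htx⟩
        exact ⟨x, List.mem_cons_of_mem _ hx, hcx, hokx, htx⟩
      · rintro ⟨x, hx, hcx, hokx, htx⟩
        rcases List.mem_cons.1 hx with rfl | hx
        · exact absurd ⟨by simpa using hcx, hokx⟩ h1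
        · exact ⟨x, hx, hcx, hokx, htx⟩

lemma gvisit_some (ok tgt : Int × Int → Bool) :
    ∀ (cs : List (Int × Int)) (seen : PySem.Set (Int × Int)) (acc : List (Int × Int))
      (s' : PySem.Set (Int × Int)) (a' : List (Int × Int)),
      gvisit ok tgt cs seen acc = some (s', a') →
      ∃ t, s' = seen ++ t ∧ a' = acc ++ t ∧ t.Nodup ∧
        ∀ x, x ∈ t ↔ seen.contains x = false ∧ ok x = true ∧ tgt x = false ∧ x ∈ cs := by
  intro cs
  induction cs with
  | nil =>
    intro seen acc s' a' h
    simp only [gvisit, Option.some.injEq, Prod.mk.injEq] at h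
    exact ⟨[], by simp [← h.1, ← h.2]⟩
  | cons c rest ih =>
    intro seen acc s' a' h
    simp only [gvisit] at h
    by_cases h1 : (¬ seen.contains c = true) ∧ ok c = true
    · rw [if_pos h1] at h
      by_cases h2 : tgt c = true
      · rw [if_pos h2] at h; exact absurd h (by simp)
      · rw [if_neg h2] at h
        have h2' : tgt c = false := by simpa using h2
        have hadd : PySem.Set.add seen c = seen ++ [c] := by
          simp [PySem.Set.add]; simpa using h1.1
        obtain ⟨t, hs, ha, hnd, hmem⟩ := ih _ _ _ _ h
        rw [hadd] at hs hmem
        refine ⟨c :: t, by simpa using hs, by simpa using ha, ?_, ?_⟩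
        · refine List.nodup_cons.2 ⟨fun hc => ?_, hnd⟩
          have := (hmem c).1 hc
          simp at this
        · intro x
          constructor
          · intro hx
            rcases List.mem_cons.1 hx with rfl | hx
            · exact ⟨by simpa using h1.1, h1.2, by simpa using h2, List.mem_cons_self⟩
            · have := (hmem x).1 hx
              simp at this
              exact ⟨by simpa using this.1.1, this.2.1, this.2.2.1,
                List.mem_cons_of_mem _ this.2.2.2⟩
          · rintro ⟨hcx, hokx, htx, hx⟩
            rcases List.mem_cons.1 hx with rfl | hx
            · exact List.mem_cons_self
            · by_cases hxc : x = c
              · subst hxc; exact List.mem_cons_self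
              · refine List.mem_cons_of_mem _ ((hmem x).2 ?_)
                have hcx' : PySem.Set.contains (seen ++ [c]) x = false := by
                  simp at hcx ⊢; exact ⟨hcx, hxc⟩
                exact ⟨hcx', hokx, htx, hx⟩
    · rw [if_neg h1] at h
      obtain ⟨t, hs, ha, hnd, hmem⟩ := ih _ _ _ _ h
      refine ⟨t, hs, ha, hnd, fun x => ?_⟩
      rw [hmem x]
      constructor
      · rintro ⟨hcx, hokx, htx, hx⟩
        exact ⟨hcx, hokx, htx, List.mem_cons_of_mem _ hx⟩
      · rintro ⟨hcx, hokx, htx, hx⟩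
        rcases List.mem_cons.1 hx with rfl | hx
        · exact absurd ⟨by simpa using hcx, hokx⟩ h1
        · exact ⟨hcx, hokx, htx, hx⟩

lemma glevel_none_iff (ok tgt : Int × Int → Bool) :
    ∀ (front : List (Int × Int)) (seen : PySem.Set (Int × Int)) (acc : List (Int × Int)),
      glevel ok tgt front seen acc = none ↔
        ∃ c' ∈ front, ∃ c ∈ nbrs c'.1 c'.2,
          seen.contains c = false ∧ ok c = true ∧ tgt c = true := by
  intro front
  induction front with
  | nil => intro seen acc; simp [glevel]
  | cons c rest ih =>
    intro seen acc
    simp only [glevel]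
    cases hg : gvisit ok tgt (nbrs c.1 c.2) seen acc with
    | none =>
      simp only [true_iff]
      obtain ⟨x, hx, h1, h2, h3⟩ := (gvisit_none_iff ok tgt _ seen acc).1 hg
      exact ⟨c, List.mem_cons_self, x, hx, h1, h2, h3⟩
    | some p =>
      obtain ⟨s', a'⟩ := p
      obtain ⟨t, rfl, rfl, hnd, hmem⟩ := gvisit_some ok tgt _ seen acc _ _ hg
      rw [ih]
      have hno := (gvisit_none_iff ok tgt (nbrs c.1 c.2) seen acc)
      rw [hg] at hno; simp only [reduceCtorEq, false_iff] at hno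
      push Not at hno
      constructor
      · rintro ⟨c', hc', x, hx, h1, h2, h3⟩
        exact ⟨c', List.mem_cons_of_mem _ hc', x, hx, (contains_append_false.1 h1).1, h2, h3⟩
      · rintro ⟨c', hc', x, hx, h1, h2, h3⟩
        rcases List.mem_cons.1 hc' with rfl | hc'
        · exact absurd h3 (by simpa using hno x hx h1 h2)
        · refine ⟨c', hc', x, hx, contains_append_false.2 ⟨h1, fun hxt => ?_⟩, h2, h3⟩
          have := ((hmem x).1 hxt).2.2.1
          rw [this] at h3; exact Bool.false_ne_true h3

lemma glevel_some (ok tgt : Int × Int → Bool) :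
    ∀ (front : List (Int × Int)) (seen : PySem.Set (Int × Int)) (acc : List (Int × Int))
      (s' : PySem.Set (Int × Int)) (a' : List (Int × Int)),
      glevel ok tgt front seen acc = some (s', a') →
      ∃ t, s' = seen ++ t ∧ a' = acc ++ t ∧ t.Nodup ∧
        ∀ x, x ∈ t ↔ seen.contains x = false ∧ ok x = true ∧ tgt x = false ∧
          ∃ c' ∈ front, x ∈ nbrs c'.1 c'.2 := by
  intro front
  induction front with
  | nil =>
    intro seen acc s' a' h
    simp only [glevel, Option.some.injEq, Prod.mk.injEq] at h
    exact ⟨[], by simp [← h.1, ← h.2]⟩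
  | cons c rest ih =>
    intro seen acc s' a' h
    simp only [glevel] at h
    cases hg : gvisit ok tgt (nbrs c.1 c.2) seen acc with
    | none => rw [hg] at h; exact absurd h (by simp)
    | some p =>
      obtain ⟨s1, a1⟩ := p
      rw [hg] at h
      obtain ⟨t1, rfl, rfl, hnd1, hmem1⟩ := gvisit_some ok tgt _ seen acc _ _ hg
      obtain ⟨t2, hs2, ha2, hnd2, hmem2⟩ := ih _ _ _ _ h
      refine ⟨t1 ++ t2, by simp [hs2], by simp [ha2], ?_, ?_⟩
      · refine List.Nodup.append hnd1 hnd2 (fun x hx1 hx2 => ?_)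
        have := (contains_append_false.1 ((hmem2 x).1 hx2).1).2
        exact this hx1
      · intro x
        simp only [List.mem_append, hmem1, hmem2, contains_append_false]
        constructor
        · rintro (⟨h1, h2, h3, h4⟩ | ⟨⟨h1, h1'⟩, h2, h3, c', hc', h4⟩)
          · exact ⟨h1, h2, h3, c, List.mem_cons_self, h4⟩
          · exact ⟨h1, h2, h3, c', List.mem_cons_of_mem _ hc', h4⟩
        · rintro ⟨h1, h2, h3, c', hc', h4⟩
          rcases List.mem_cons.1 hc' with rfl | hc'
          · exact Or.inl ⟨h1, h2, h3, h4⟩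
          · by_cases hxt : x ∈ t1
            · exact Or.inl ((hmem1 x).1 hxt)
            · exact Or.inr ⟨⟨h1, fun hp => hxt ((hmem1 x).2 hp)⟩, h2, h3, c', hc', h4⟩

-- ---------- the BFS characterization theorem ----------

-- if no cell is at layer r, nothing new is ever reached beyond r
lemma layers_die (ok tgt : Int × Int → Bool) (S0 : List (Int × Int)) (r : Nat)
    (h : ∀ c, ¬ (PReach ok tgt S0 r c ∧ ∀ j < r, ¬ PReach ok tgt S0 j c)) :
    ∀ k c, r ≤ k → PReach ok tgt S0 k c → ∃ j < r, PReach ok tgt S0 j c := by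
  intro k
  induction k with
  | zero =>
    intro c hr hP
    have hr0 : r = 0 := Nat.le_zero.1 hr
    subst hr0
    exact (h c ⟨hP, fun j hj => absurd hj (by omega)⟩).elim
  | succ k ih =>
    intro c hr hP
    rcases Nat.lt_or_ge k r with hk | hk
    · -- r = k + 1
      have hrk : r = k + 1 := by omega
      subst hrk
      by_cases hex : ∃ j < k + 1, PReach ok tgt S0 j c
      · exact hex
      · exact (h c ⟨hP, fun j hj hPj => hex ⟨j, hj, hPj⟩⟩).elim
    · obtain ⟨hok, htgt, hs0, c', hPc', hadj⟩ := hP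
      obtain ⟨j, hj, hPj⟩ := ih c' hk hPc'
      have hPj1 : PReach ok tgt S0 (j + 1) c := ⟨hok, htgt, hs0, c', hPj, hadj⟩
      rcases Nat.lt_or_ge (j + 1) r with hlt | hge
      · exact ⟨j + 1, hlt, hPj1⟩
      · have hrj : r = j + 1 := by omega
        subst hrj
        by_cases hex : ∃ j' < j + 1, PReach ok tgt S0 j' c
        · exact hex
        · exact (h c ⟨hPj1, fun j' hj' hPj' => hex ⟨j', hj', hPj'⟩⟩).elim

lemma gbfs_char (ok tgt : Int × Int → Bool) (cells S0 : List (Int × Int))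
    (hok : ∀ c, ok c = true → c ∈ cells)
    (hS0t : ∀ c ∈ S0, tgt c = false) :
    ∀ (fuel : Nat) (seen : PySem.Set (Int × Int)) (frontier : List (Int × Int)) (r : Nat),
      (∀ c, seen.contains c = true ↔ ∃ j ≤ r, PReach ok tgt S0 j c) →
      (∀ c, c ∈ frontier ↔ (PReach ok tgt S0 r c ∧ ∀ j < r, ¬ PReach ok tgt S0 j c)) →
      seen.Nodup → (∀ c ∈ seen, c ∈ cells) →
      (frontier ≠ [] → fuel + seen.length ≥ cells.length + 1) →
      (∀ j < r, ¬ GSol ok tgt S0 j) →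
      LeastSpec (GSol ok tgt S0) (gbfs ok tgt seen frontier (r : Int) fuel) := by
  intro fuel
  induction fuel with
  | zero =>
    intro seen frontier r hseen hfro hnd hcells hfuel hnos
    cases frontier with
    | nil =>
      rw [gbfs]; simp only [List.isEmpty_nil]
      refine Or.inr ⟨?_, rfl⟩
      have hlay : ∀ c, ¬ (PReach ok tgt S0 r c ∧ ∀ j < r, ¬ PReach ok tgt S0 j c) :=
        fun c hc => List.not_mem_nil ((hfro c).2 hc)
      intro d hS
      rcases Nat.lt_or_ge d r with hd | hd
      · exact hnos d hd hS
      · obtain ⟨c', c, hP, hadj, hok', htgt⟩ := hS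
        obtain ⟨j, hj, hPj⟩ := layers_die ok tgt S0 r hlay d c' hd hP
        exact hnos j hj ⟨c', c, hPj, hadj, hok', htgt⟩
    | cons c0 fr =>
      have hlen : seen.length ≤ cells.length :=
        (List.subperm_of_subset hnd (fun x hx => hcells x hx)).length_le
      have := hfuel (by simp)
      omega
  | succ f ih =>
    intro seen frontier r hseen hfro hnd hcells hfuel hnos
    cases hfe : frontier with
    | nil =>
      subst hfe
      rw [gbfs]; simp only [List.isEmpty_nil]
      refine Or.inr ⟨?_, rfl⟩
      have hlay : ∀ c, ¬ (PReach ok tgt S0 r c ∧ ∀ j < r, ¬ PReach ok tgt S0 j c) :=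
        fun c hc => List.not_mem_nil ((hfro c).2 hc)
      intro d hS
      rcases Nat.lt_or_ge d r with hd | hd
      · exact hnos d hd hS
      · obtain ⟨c', c, hP, hadj, hok', htgt⟩ := hS
        obtain ⟨j, hj, hPj⟩ := layers_die ok tgt S0 r hlay d c' hd hP
        exact hnos j hj ⟨c', c, hPj, hadj, hok', htgt⟩
    | cons c0 fr =>
      subst hfe
      rw [gbfs.eq_def]
      simp only [List.isEmpty_cons, Bool.false_eq_true, if_false]
      cases hg : glevel ok tgt (c0 :: fr) seen [] with
      | none =>
        obtain ⟨c', hc', x, hx, hcx, hokx, htx⟩ := (glevel_none_iff ok tgt _ seen []).1 hg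
        exact Or.inl ⟨r, ⟨c', x, ((hfro c').1 hc').1, hx, hokx, htx⟩, hnos, rfl⟩
      | some p =>
        obtain ⟨s', nxt⟩ := p
        obtain ⟨t, rfl, hnxt, hndt, hmemt⟩ := glevel_some ok tgt _ seen [] _ _ hg
        simp only [List.nil_append] at hnxt
        subst hnxt
        -- no solution at depth r
        have hnoSolr : ¬ GSol ok tgt S0 r := by
          rintro ⟨c', x, hP, hadj, hokx, htx⟩
          have hc'fr : c' ∈ c0 :: fr := by
            refine (hfro c').2 ⟨hP, fun j hj hPj => ?_⟩
            exact hnos j hj ⟨c', x, hPj, hadj, hokx, htx⟩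
          have hcx : PySem.Set.contains seen x = false := by
            rw [contains_false_iff]
            intro hxs
            obtain ⟨j, hj, hPj⟩ := (hseen x).1 (contains_true_iff.2 hxs)
            cases j with
            | zero => exact Bool.false_ne_true ((hS0t x hPj).symm.trans htx)
            | succ j' => exact Bool.false_ne_true (hPj.2.1.symm.trans htx)
          have := (glevel_none_iff ok tgt (c0 :: fr) seen []).2
            ⟨c', hc'fr, x, hadj, hcx, hokx, htx⟩
          rw [hg] at this
          exact Option.some_ne_none _ this
        -- invariants at level r+1
        have hnos' : ∀ j < r + 1, ¬ GSol ok tgt S0 j := by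
          intro j hj
          rcases Nat.lt_or_ge j r with h' | h'
          · exact hnos j h'
          · have : j = r := by omega
            subst this; exact hnoSolr
        have hseenF : ∀ x, PySem.Set.contains seen x = false ↔ ¬ ∃ j ≤ r, PReach ok tgt S0 j x := by
          intro x
          rw [contains_false_iff]
          constructor
          · intro hxs hex; exact hxs (contains_true_iff.1 ((hseen x).2 hex))
          · intro hex hxs; exact hex ((hseen x).1 (contains_true_iff.2 hxs))
        have hPnew : ∀ x, x ∈ nxt → PReach ok tgt S0 (r + 1) x := by
          intro x hxt
          obtain ⟨hcx, hokx, htx, c', hc', hadj⟩ := (hmemt x).1 hxt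
          have hns0 : x ∉ S0 := by
            intro hx0
            exact (hseenF x).1 hcx ⟨0, Nat.zero_le _, hx0⟩
          exact ⟨hokx, htx, hns0, c', ((hfro c').1 hc').1, hadj⟩
        have hlayt : ∀ x, x ∈ nxt ↔ (PReach ok tgt S0 (r + 1) x ∧ ∀ j < r + 1, ¬ PReach ok tgt S0 j x) := by
          intro x
          constructor
          · intro hxt
            refine ⟨hPnew x hxt, fun j hj hPj => ?_⟩
            exact (hseenF x).1 ((hmemt x).1 hxt).1 ⟨j, by omega, hPj⟩
          · rintro ⟨hP, hmin⟩
            obtain ⟨hokx, htx, hns0, c', hPc', hadj⟩ := hP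
            have hcx : PySem.Set.contains seen x = false :=
              (hseenF x).2 (fun ⟨j, hj, hPj⟩ => hmin j (by omega) hPj)
            refine (hmemt x).2 ⟨hcx, hokx, htx, c', ?_, hadj⟩
            refine (hfro c').2 ⟨hPc', fun j hj hPj => ?_⟩
            have : PReach ok tgt S0 (j + 1) x := ⟨hokx, htx, hns0, c', hPj, hadj⟩
            exact hmin (j + 1) (by omega) this
        have hseen' : ∀ x, PySem.Set.contains (seen ++ nxt) x = true ↔ ∃ j ≤ r + 1, PReach ok tgt S0 j x := by
          intro x
          rw [contains_true_iff]
          simp only [List.mem_append]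
          constructor
          · rintro (hx | hx)
            · obtain ⟨j, hj, hPj⟩ := (hseen x).1 (contains_true_iff.2 hx)
              exact ⟨j, by omega, hPj⟩
            · exact ⟨r + 1, le_refl _, hPnew x hx⟩
          · rintro ⟨j, hj, hPj⟩
            rcases Nat.lt_or_ge j (r + 1) with h' | h'
            · exact Or.inl (contains_true_iff.1 ((hseen x).2 ⟨j, by omega, hPj⟩))
            · have : j = r + 1 := by omega
              subst this
              by_cases hxs : x ∈ seen
              · exact Or.inl hxs
              · refine Or.inr ((hlayt x).2 ⟨hPj, fun j' hj' hPj' => ?_⟩)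
                exact hxs (contains_true_iff.1 ((hseen x).2 ⟨j', by omega, hPj'⟩))
        have hnd' : (seen ++ nxt).Nodup := by
          refine List.Nodup.append hnd hndt (fun x hx1 hx2 => ?_)
          exact contains_false_iff.1 ((hmemt x).1 hx2).1 hx1
        have hcells' : ∀ x ∈ seen ++ nxt, x ∈ cells := by
          intro x hx
          rcases List.mem_append.1 hx with hx | hx
          · exact hcells x hx
          · exact hok x ((hmemt x).1 hx).2.1 -- placeholder
        have hfuel' : nxt ≠ [] → f + (seen ++ nxt).length ≥ cells.length + 1 := by
          intro ht
          have : nxt.length ≥ 1 := by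
            cases nxt with
            | nil => exact absurd rfl ht
            | cons a b => simp
          have := hfuel (by simp)
          simp only [List.length_append]
          omega
        have := ih (seen ++ nxt) nxt (r + 1) hseen' hlayt hnd' hcells' hfuel' hnos'
        have hcast : ((r : Int) + 1) = ((r + 1 : Nat) : Int) := by push_cast; ring
        rw [hcast]
        exact this

-- ---------- simulation: A's queue loop is gbfs with (okA, tgtA) ----------

-- row lengths never change, so shape is preserved by mark
def Shape (g0 g : List (List String)) : Prop :=
  g.length = g0.length ∧ ∀ i : Nat, (g.getD i []).length = (g0.getD i []).length

-- the mutated grid g is the original g0 with exactly the cells of S overwritten by 'X'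
def Marks (g0 : List (List String)) (n m : Nat) (S : PySem.Set (Int × Int))
    (g : List (List String)) : Prop :=
  Shape g0 g ∧ ∀ x y : Int, 0 ≤ x → x < n → 0 ≤ y → y < m →
    cellD g x y = if S.contains (x, y) then "X" else cellD g0 x y

-- continue gbfs from the middle of a level
def gmid (ok tgt : Int × Int → Bool) (front : List (Int × Int))
    (seen : PySem.Set (Int × Int)) (acc : List (Int × Int)) (d : Int) (f : Nat) : Int :=
  match glevel ok tgt front seen acc with
  | none => d + 1
  | some (s', nxt) => gbfs ok tgt s' nxt (d + 1) f

def tgtA (g0 : List (List String)) (c : Int × Int) : Bool := cellD g0 c.1 c.2 == "#"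

lemma cellD_nonneg (g : List (List String)) (x y : Int) (hx : 0 ≤ x) (hy : 0 ≤ y) :
    cellD g x y = (g.getD x.toNat []).getD y.toNat "X" := by
  rw [cellD, PySem.List.pyGetD_of_nonneg _ _ hx, PySem.List.pyGetD_of_nonneg _ _ hy]

lemma shape_refl (g : List (List String)) : Shape g g := ⟨rfl, fun _ => rfl⟩

lemma shape_mark (g0 g : List (List String)) (x y : Int) (hx : 0 ≤ x) (h : Shape g0 g) :
    Shape g0 (mark g x y) := by
  obtain ⟨h1, h2⟩ := h
  refine ⟨by simp [mark, h1], fun i => ?_⟩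
  rw [mark]
  by_cases hi : i = x.toNat
  · subst hi
    by_cases hlt : x.toNat < g.length
    · rw [List.getD_eq_getElem?_getD, List.getElem?_set_self hlt]
      simp only [Option.getD_some, List.length_set]
      rw [PySem.List.pyGetD_of_nonneg _ _ hx]
      exact h2 x.toNat
    · rw [List.set_eq_of_length_le (by omega)]
      exact h2 x.toNat
  · rw [List.getD_eq_getElem?_getD, List.getElem?_set_ne (fun hc => hi hc.symm),
      ← List.getD_eq_getElem?_getD]
    exact h2 i

lemma cellD_mark (g : List (List String)) (x y a b : Int)
    (hx0 : 0 ≤ x) (hy0 : 0 ≤ y) (ha0 : 0 ≤ a) (hb0 : 0 ≤ b)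
    (hxl : x.toNat < g.length) (hyl : y.toNat < (g.getD x.toNat []).length) :
    cellD (mark g x y) a b = if a = x ∧ b = y then "X" else cellD g a b := by
  have hyl' : y.toNat < (g[x.toNat]?.getD []).length := by
    simpa [List.getD_eq_getElem?_getD] using hyl
  rw [cellD_nonneg (mark g x y) a b ha0 hb0, mark, PySem.List.pyGetD_of_nonneg _ _ hx0]
  simp only [List.getD_eq_getElem?_getD]
  by_cases hax : a = x
  · subst hax
    rw [List.getElem?_set_self hxl, Option.getD_some]
    by_cases hby : b = y
    · subst hby
      rw [List.getElem?_set_self hyl']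
      simp
    · have hbn : y.toNat ≠ b.toNat := by omega
      rw [List.getElem?_set_ne hbn, cellD_nonneg g a b ha0 hb0]
      simp only [List.getD_eq_getElem?_getD]
      simp [hby]
  · have han : x.toNat ≠ a.toNat := by omega
    rw [List.getElem?_set_ne han, cellD_nonneg g a b ha0 hb0]
    simp only [List.getD_eq_getElem?_getD]
    simp [hax]

lemma marks_add (g0 : List (List String)) (n m : Nat)
    (hsh0 : ∀ row ∈ g0, m ≤ row.length) (hn0 : g0.length = n)
    (S : PySem.Set (Int × Int)) (g : List (List String)) (x y : Int)
    (hM : Marks g0 n m S g) (hx0 : 0 ≤ x) (hxn : x < (n : Int)) (hy0 : 0 ≤ y)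
    (hym : y < (m : Int)) (hnc : S.contains (x, y) = false) :
    Marks g0 n m (PySem.Set.add S (x, y)) (mark g x y) := by
  obtain ⟨⟨hl, hrows⟩, hcell⟩ := hM
  have hxl : x.toNat < g.length := by omega
  have hyl : y.toNat < (g.getD x.toNat []).length := by
    rw [hrows]
    have hmem : g0.getD x.toNat [] ∈ g0 := by
      rw [List.getD_eq_getElem?_getD, List.getElem?_eq_getElem (by omega)]
      exact List.getElem_mem _
    have := hsh0 _ hmem
    omega
  refine ⟨shape_mark _ _ _ _ hx0 ⟨hl, hrows⟩, fun a b ha0 han hb0 hbm => ?_⟩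
  rw [cellD_mark g x y a b hx0 hy0 ha0 hb0 hxl hyl]
  have hadd : PySem.Set.add S (x, y) = S ++ [(x, y)] := by
    simp [PySem.Set.add]
    simpa using contains_false_iff.1 hnc
  rw [hadd]
  by_cases hab : a = x ∧ b = y
  · obtain ⟨rfl, rfl⟩ := hab
    simp
  · have hne : (a, b) ≠ (x, y) := by
      intro hc
      exact hab ⟨congrArg Prod.fst hc, congrArg Prod.snd hc⟩
    have : PySem.Set.contains (S ++ [(x, y)]) (a, b) = PySem.Set.contains S (a, b) := by
      simp [hne]
    rw [this, hcell a b ha0 han hb0 hbm]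
    simp [hab]

lemma visitA_sim (g0 : List (List String)) (n m : Nat)
    (hsh0 : ∀ row ∈ g0, m ≤ row.length) (hn0 : g0.length = n) :
    ∀ (cs : List (Int × Int)) (g : List (List String)) (S : PySem.Set (Int × Int))
      (acc1 acc2 : List (Int × Int)), Marks g0 n m S g →
      (visitA (n : Int) (m : Int) cs g acc1 = none ↔
        gvisit (okf g0 n m) (tgtA g0) cs S acc2 = none) ∧
      (∀ g' a1, visitA (n : Int) (m : Int) cs g acc1 = some (g', a1) →
        ∃ S' a2 t, gvisit (okf g0 n m) (tgtA g0) cs S acc2 = some (S', a2) ∧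
          a1 = acc1 ++ t ∧ a2 = acc2 ++ t ∧ Marks g0 n m S' g') := by
  intro cs
  induction cs with
  | nil =>
    intro g S acc1 acc2 hM
    refine ⟨by simp [visitA, gvisit], fun g' a1 h => ?_⟩
    simp only [visitA, Option.some.injEq, Prod.mk.injEq] at h
    exact ⟨S, acc2, [], by simp [gvisit, ← h.1, ← h.2, hM]⟩
  | cons c rest ih =>
    intro g S acc1 acc2 hM
    obtain ⟨x, y⟩ := c
    simp only [visitA, gvisit]
    by_cases hin : 0 ≤ x ∧ x < (n : Int) ∧ 0 ≤ y ∧ y < (m : Int)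
    · rw [if_pos hin]
      obtain ⟨hx0, hxn, hy0, hym⟩ := hin
      have hcg : cellD g x y =
          if PySem.Set.contains S (x, y) then "X" else cellD g0 x y :=
        hM.2 x y hx0 hxn hy0 hym
      by_cases hS : PySem.Set.contains S (x, y) = true
      · rw [if_pos hS] at hcg
        have hcond : ¬ (¬ PySem.Set.contains S (x, y) = true ∧ okf g0 n m (x, y) = true) :=
          fun h => h.1 hS
        rw [if_neg hcond, hcg, if_neg (by simp), if_neg (by simp)]
        exact ih g S acc1 acc2 hM
      · have hSf : PySem.Set.contains S (x, y) = false := Bool.eq_false_iff.2 hS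
        rw [if_neg (by rw [hSf]; simp)] at hcg
        by_cases hfood : cellD g0 x y = "#"
        · have hokt : okf g0 n m (x, y) = true := by
            simp [okf, hx0, hxn, hy0, hym]
            simp [hfood]
          have htgt : tgtA g0 (x, y) = true := by simp [tgtA, hfood]
          rw [if_pos (by rw [hcg]; exact hfood), if_pos ⟨by rw [hSf]; simp, hokt⟩, if_pos htgt]
          exact ⟨by simp, fun g' a1 h => by simp at h⟩
        · by_cases hwall : cellD g0 x y = "X"
          · have hokf : okf g0 n m (x, y) = false := by
              simp [okf, hwall]
            rw [if_neg (by rw [hcg]; exact hfood), if_neg (by rw [hcg]; simp [hwall]),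
              if_neg (by rw [hokf]; simp)]
            exact ih g S acc1 acc2 hM
          · have hokt : okf g0 n m (x, y) = true := by
              simp [okf, hx0, hxn, hy0, hym, hwall]
            have htgt : tgtA g0 (x, y) = false := by simp [tgtA, hfood]
            have hM' : Marks g0 n m (PySem.Set.add S (x, y)) (mark g x y) :=
              marks_add g0 n m hsh0 hn0 S g x y hM hx0 hxn hy0 hym hSf
            rw [if_neg (by rw [hcg]; exact hfood), if_pos (by rw [hcg]; exact hwall),
              if_pos ⟨by rw [hSf]; simp, hokt⟩, if_neg (by rw [htgt]; simp)]
            obtain ⟨hiff, hsome⟩ :=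
              ih (mark g x y) (PySem.Set.add S (x, y)) (acc1 ++ [(x, y)]) (acc2 ++ [(x, y)]) hM'
            refine ⟨hiff, fun g' a1 h => ?_⟩
            obtain ⟨S', a2, t, hgv, ha1, ha2, hM''⟩ := hsome g' a1 h
            exact ⟨S', a2, (x, y) :: t, hgv, by simp [ha1], by simp [ha2], hM''⟩
    · rw [if_neg hin]
      have hcond : ¬ (¬ PySem.Set.contains S (x, y) = true ∧ okf g0 n m (x, y) = true) := by
        rintro ⟨_, h2⟩
        simp only [okf, Bool.and_eq_true, decide_eq_true_eq] at h2
        exact hin h2.1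
      rw [if_neg hcond]
      exact ih g S acc1 acc2 hM

lemma loopA_sim (g0 : List (List String)) (n m : Nat)
    (hsh0 : ∀ row ∈ g0, m ≤ row.length) (hn0 : g0.length = n)
    (cells : List (Int × Int)) (hcl : cells.length = n * m)
    (hok : ∀ c, okf g0 n m c = true → c ∈ cells) :
    ∀ (N fuelA fB : Nat) (g : List (List String)) (F acc : List (Int × Int))
      (S : PySem.Set (Int × Int)) (res : Int),
      fuelA + fB = N →
      Marks g0 n m S g → S.Nodup → (∀ c ∈ S, c ∈ cells) →
      fuelA + S.length ≥ (F ++ acc).length + n * m →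
      fB + S.length ≥ n * m + 1 + acc.length →
      loopA (n : Int) (m : Int) g (F ++ acc) F.length res fuelA =
        gmid (okf g0 n m) (tgtA g0) F S acc res fB := by
  intro N
  induction N using Nat.strong_induction_on with
  | _ N IH =>
  intro fuelA fB g F acc S res hN hM hnd hcells hfA hfB
  have hSlen : S.length ≤ cells.length := (List.subperm_of_subset hnd hcells).length_le
  cases F with
  | nil =>
    rw [loopA.eq_def, gmid]
    simp only [glevel, List.nil_append, List.length_nil]
    cases acc with
    | nil => rw [gbfs.eq_def]; simp
    | cons a as =>
      have hfB1 : 1 ≤ fB := by omega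
      obtain ⟨fB', rfl⟩ : ∃ fB', fB = fB' + 1 := ⟨fB - 1, by omega⟩
      rw [gbfs.eq_def]
      simp only [List.isEmpty_cons, Bool.false_eq_true, if_false]
      have := IH (fuelA + fB') (by omega) fuelA fB' g (a :: as) [] S (res + 1) rfl hM hnd
        hcells (by simpa using hfA) (by simp at hfB ⊢; omega)
      simpa [gmid] using this
  | cons c F' =>
    have hfA1 : 1 ≤ fuelA := by
      have : (c :: F' ++ acc).length ≥ 1 := by simp
      omega
    obtain ⟨fA', rfl⟩ : ∃ fA', fuelA = fA' + 1 := ⟨fuelA - 1, by omega⟩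
    obtain ⟨x, y⟩ := c
    rw [loopA.eq_def, gmid]
    simp only [glevel, List.length_cons, List.cons_append]
    obtain ⟨hiff, hsome⟩ := visitA_sim g0 n m hsh0 hn0 (nbrs x y) g S [] acc hM
    cases hv : visitA (n : Int) (m : Int) (nbrs x y) g [] with
    | none =>
      rw [hiff.1 hv]
    | some p =>
      obtain ⟨g', app⟩ := p
      obtain ⟨S', a2, t, hgv, happ, ha2, hM'⟩ := hsome g' app hv
      rw [hgv]
      simp only [List.nil_append] at happ
      subst happ
      obtain ⟨t2, hS2, ha22, hndt2, hmem2⟩ := gvisit_some _ _ _ _ _ _ _ hgv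
      have ht2 : t2 = app := by
        rw [ha2] at ha22
        exact (List.append_cancel_left ha22).symm
      subst ht2
      subst hS2
      dsimp only
      have hndS' : (S ++ t2).Nodup := by
        refine List.Nodup.append hnd hndt2 (fun z hz1 hz2 => ?_)
        exact contains_false_iff.1 ((hmem2 z).1 hz2).1 hz1
      have hcells' : ∀ z ∈ S ++ t2, z ∈ cells := by
        intro z hz
        rcases List.mem_append.1 hz with hz | hz
        · exact hcells z hz
        · exact hok z ((hmem2 z).1 hz).2.1
      have hq : (F' ++ acc) ++ t2 = F' ++ (acc ++ t2) := List.append_assoc _ _ _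
      rw [hq, ha2]
      have := IH (fA' + fB) (by omega) fA' fB g' F' (acc ++ t2) (S ++ t2) res rfl hM' hndS'
        hcells' (by simp at hfA ⊢; omega) (by simp at hfB ⊢; omega)
      simpa [gmid, ha2] using this

-- ---------- path reversal ----------

def Adjc (a b : Int × Int) : Prop := b ∈ nbrs a.1 a.2

lemma adjc_symm (a b : Int × Int) : Adjc a b ↔ Adjc b a := by
  simp only [Adjc, nbrs, List.mem_cons, List.not_mem_nil, or_false, Prod.ext_iff]
  obtain ⟨a1, a2⟩ := a
  obtain ⟨b1, b2⟩ := b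
  simp only
  omega

-- a path of k edges from u to v whose nodes AFTER u all satisfy W
def LinkT (W : Int × Int → Prop) : Nat → (Int × Int) → (Int × Int) → Prop
  | 0, u, v => u = v
  | k + 1, u, v => W v ∧ ∃ w, LinkT W k u w ∧ Adjc w v

lemma preach_iff_linkT (ok tgt : Int × Int → Bool) (S0 : List (Int × Int))
    (W : Int × Int → Prop)
    (hW : ∀ c, (ok c = true ∧ tgt c = false ∧ c ∉ S0) ↔ W c) :
    ∀ (d : Nat) (c : Int × Int),
      PReach ok tgt S0 d c ↔ ∃ u ∈ S0, LinkT W d u c := by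
  intro d
  induction d with
  | zero =>
    intro c
    simp only [PReach, LinkT]
    constructor
    · intro h; exact ⟨c, h, rfl⟩
    · rintro ⟨u, hu, rfl⟩; exact hu
  | succ k ih =>
    intro c
    simp only [PReach, LinkT]
    constructor
    · rintro ⟨h1, h2, h3, c', hP, hadj⟩
      obtain ⟨u, hu, hL⟩ := (ih c').1 hP
      exact ⟨u, hu, (hW c).1 ⟨h1, h2, h3⟩, c', hL, hadj⟩
    · rintro ⟨u, hu, hw, c', hL, hadj⟩
      obtain ⟨h1, h2, h3⟩ := (hW c).2 hw
      exact ⟨h1, h2, h3, c', (ih c').2 ⟨u, hu, hL⟩, hadj⟩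

-- full path object: L edges u → v, interior nodes satisfy W
def PathSpec (W : Int × Int → Prop) (u v : Int × Int) (L : Nat) : Prop :=
  ∃ l : List (Int × Int), l.IsChain Adjc ∧ l.head? = some u ∧ l.getLast? = some v ∧
    l.length = L + 1 ∧ ∀ z ∈ (l.drop 1).dropLast, W z

lemma getLast_mem_drop_one (l : List (Int × Int)) (h : 2 ≤ l.length) (hne : l ≠ []) :
    l.getLast hne ∈ l.drop 1 := by
  have h2 : (l.drop 1).getLast? = l.getLast? := by
    rw [List.getLast?_drop]; simp; omega
  have h3 : l.getLast? = some (l.getLast hne) := List.getLast?_eq_some_getLast hne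
  have h4 : (l.drop 1) ≠ [] := by
    intro hc; have := congrArg List.length hc; simp at this; omega
  have h5 := List.getLast?_eq_some_getLast h4
  rw [h2, h3] at h5
  rw [Option.some_inj] at h5
  rw [h5]
  exact List.getLast_mem h4

lemma pathSpec_snoc_intro (W : Int × Int → Prop) (u c' v : Int × Int) (L : Nat)
    (hP : PathSpec W u c' L) (hadj : Adjc c' v) (hw : L = 0 ∨ W c') :
    PathSpec W u v (L + 1) := by
  obtain ⟨l, hc, hh, hl, hlen, hint⟩ := hP
  have hne : l ≠ [] := by intro hc'; rw [hc'] at hh; simp at hh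
  refine ⟨l ++ [v], ?_, ?_, by simp, by simp [hlen], ?_⟩
  · rw [List.isChain_append]
    refine ⟨hc, by simp, fun x hx y hy => ?_⟩
    rw [hl] at hx; simp at hx hy; subst hx; subst hy; exact hadj
  · rw [List.head?_append_of_ne_nil _ hne]; exact hh
  · rw [List.drop_append_of_le_length (by omega), List.dropLast_concat]
    intro z hz
    rcases eq_or_ne (l.drop 1) [] with hd | hd
    · rw [hd] at hz; simp at hz
    · rcases (by
        conv at hz => rw [← List.dropLast_concat_getLast hd]
        exact List.mem_append.1 hz : z ∈ (l.drop 1).dropLast ∨ z ∈ [(l.drop 1).getLast hd]) with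
        h | h
      · exact hint z h
      · have h' : z = (l.drop 1).getLast hd := List.mem_singleton.1 h
        rcases hw with h0 | hWc'
        · subst h0
          have h1 : l.length = 1 := hlen
          have : l.drop 1 = [] := by
            apply List.eq_nil_of_length_eq_zero; simp [h1]
          exact absurd this hd
        · have hlen2 : 1 < l.length := by
            have hne' : (l.drop 1).length ≠ 0 := fun h0 => hd (List.eq_nil_of_length_eq_zero h0)
            simp at hne'
            omega
          have hlast : (l.drop 1).getLast? = l.getLast? := by
            rw [List.getLast?_drop]
            simp [hlen2]
          have e1 : some ((l.drop 1).getLast hd) = some c' := by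
            rw [← List.getLast?_eq_some_getLast hd, hlast, hl]
          rw [Option.some_inj] at e1
          rw [h', e1]
          exact hWc'

lemma pathSpec_snoc_elim (W : Int × Int → Prop) (u v : Int × Int) (L : Nat)
    (hP : PathSpec W u v (L + 1)) :
    ∃ c', PathSpec W u c' L ∧ Adjc c' v ∧ (L = 0 ∨ W c') := by
  obtain ⟨l, hc, hh, hl, hlen, hint⟩ := hP
  have hne : l ≠ [] := by intro hc'; rw [hc'] at hh; simp at hh
  have hdec : l.dropLast ++ [l.getLast hne] = l := List.dropLast_concat_getLast hne
  have hv : l.getLast hne = v := by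
    have := List.getLast?_eq_some_getLast hne
    rw [hl, Option.some_inj] at this; exact this.symm
  have hlen0 : l.dropLast.length = L + 1 := by
    simp [hlen]
  have h0ne : l.dropLast ≠ [] := by
    intro hc'; have := congrArg List.length hc'; rw [hlen0] at this; simp at this
  refine ⟨l.dropLast.getLast h0ne, ⟨l.dropLast, ?_, ?_, List.getLast?_eq_some_getLast h0ne,
    hlen0, ?_⟩, ?_, ?_⟩
  · rw [← hdec] at hc
    exact (List.isChain_append.1 hc).1
  · rw [← hdec] at hh
    rw [← List.head?_append_of_ne_nil _ h0ne]
    exact hh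
  · intro z hz
    apply hint z
    have hsub : (l.dropLast.drop 1).dropLast ⊆ (l.drop 1).dropLast := by
      rw [List.drop_one, List.drop_one, List.tail_dropLast]
      exact List.dropLast_subset _
    exact hsub hz
  · rw [← hdec] at hc
    obtain ⟨-, -, hR⟩ := List.isChain_append.1 hc
    have := hR (l.dropLast.getLast h0ne) (by simp [List.getLast?_eq_some_getLast h0ne])
      (l.getLast hne) (by simp)
    rw [hv] at this
    exact this
  · cases L with
    | zero =>
      left; rfl
    | succ L' =>
      right
      apply hint
      rw [List.drop_one, ← List.tail_dropLast, ← List.drop_one]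
      exact getLast_mem_drop_one l.dropLast (by omega) h0ne

lemma linkM_iff_pathSpec (W : Int × Int → Prop) :
    ∀ (d : Nat) (u v : Int × Int),
      (∃ c', LinkT W d u c' ∧ Adjc c' v) ↔ PathSpec W u v (d + 1) := by
  intro d
  induction d with
  | zero =>
    intro u v
    constructor
    · rintro ⟨c', huc, hadj⟩
      subst huc
      exact pathSpec_snoc_intro W u u v 0 ⟨[u], by simp, rfl, rfl, rfl, by simp⟩ hadj
        (Or.inl rfl)
    · intro hP
      obtain ⟨c', hPc, hadj, -⟩ := pathSpec_snoc_elim W u v 0 hP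
      obtain ⟨l, hc, hh, hl, hlen, -⟩ := hPc
      have : l = [u] := by
        cases l with
        | nil => simp at hh
        | cons a t =>
          cases t with
          | nil => simp at hh; rw [hh]
          | cons b t' => simp at hlen
      rw [this] at hl
      simp at hl
      subst hl
      exact ⟨u, rfl, hadj⟩
  | succ d ih =>
    intro u v
    constructor
    · rintro ⟨c', ⟨hw, w, hL, hadj'⟩, hadj⟩
      exact pathSpec_snoc_intro W u c' v (d + 1) ((ih u c').1 ⟨w, hL, hadj'⟩) hadj
        (Or.inr hw)
    · intro hP
      obtain ⟨c', hPc, hadj, hw⟩ := pathSpec_snoc_elim W u v (d + 1) hP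
      rcases hw with h0 | hw
      · simp at h0
      · obtain ⟨w, hL, hadj'⟩ := (ih u c').2 hPc
        exact ⟨c', ⟨hw, w, hL, hadj'⟩, hadj⟩

lemma pathSpec_rev (W : Int × Int → Prop) (u v : Int × Int) (L : Nat)
    (h : PathSpec W u v L) : PathSpec W v u L := by
  obtain ⟨l, hc, hh, hl, hlen, hint⟩ := h
  refine ⟨l.reverse, ?_, by rw [List.head?_reverse]; exact hl,
    by rw [List.getLast?_reverse]; exact hh, by simp [hlen], ?_⟩
  · rw [List.isChain_reverse]
    exact hc.imp (fun a b hab => (adjc_symm a b).1 hab)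
  · intro z hz
    apply hint z
    rw [List.drop_one, List.tail_reverse, List.dropLast_reverse, List.tail_dropLast] at hz
    rw [List.drop_one]
    exact (List.mem_reverse).1 hz

-- ---------- grid bookkeeping: cells, the start scan, the food scan ----------

def cellsList (n m : Nat) : List (Int × Int) :=
  (List.range n).flatMap (fun i => (List.range m).map (fun j => ((i : Int), (j : Int))))

lemma cellsList_length (n m : Nat) : (cellsList n m).length = n * m := by
  simp [cellsList, List.length_flatMap]

lemma mem_cellsList (n m : Nat) (c : Int × Int) :
    c ∈ cellsList n m ↔ 0 ≤ c.1 ∧ c.1 < (n : Int) ∧ 0 ≤ c.2 ∧ c.2 < (m : Int) := by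
  simp only [cellsList, List.mem_flatMap, List.mem_map]
  constructor
  · rintro ⟨i, hi, j, hj, rfl⟩
    simp at hi hj
    obtain ⟨a, ha, rfl⟩ := hi
    obtain ⟨b, hb, rfl⟩ := hj
    dsimp only
    omega
  · rintro ⟨h1, h2, h3, h4⟩
    refine ⟨c.1, ?_, c.2, ?_, ?_⟩
    · simp
      exact ⟨c.1.toNat, by omega, by omega⟩
    · simp
      exact ⟨c.2.toNat, by omega, by omega⟩
    · exact Prod.mk.eta

lemma okf_mem_cells (g0 : List (List String)) (n m : Nat) (c : Int × Int)
    (h : okf g0 n m c = true) : c ∈ cellsList n m := by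
  simp only [okf, Bool.and_eq_true, decide_eq_true_eq] at h
  exact (mem_cellsList n m c).2 ⟨h.1.1, h.1.2.1, h.1.2.2.1, h.1.2.2.2⟩

lemma findStartAux_spec (m : Nat) :
    ∀ (g : List (List String)) (i0 : Int) (s : Int × Int),
      findStartAux m g i0 = some s →
      ∃ k : Nat, k < g.length ∧ s.1 = i0 + k ∧ ∃ jn : Nat, jn < m ∧ s.2 = (jn : Int) ∧
        (g.getD k []).getD jn "" = "*" := by
  intro g
  induction g with
  | nil => intro i0 s h; simp [findStartAux] at h
  | cons row rest ih =>
    intro i0 s h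
    simp only [findStartAux] at h
    cases hf : (List.range m).find? (fun j => row.getD j "" == "*") with
    | some j =>
      rw [hf] at h
      have hj := List.find?_some hf
      have hjm : j < m := by simpa using List.mem_range.1 (List.mem_of_find?_eq_some hf)
      simp only [Option.some.injEq] at h
      refine ⟨0, by simp, ?_, j, hjm, ?_, ?_⟩
      · rw [← h]; simp
      · rw [← h]
      · simpa using hj
    | none =>
      rw [hf] at h
      obtain ⟨k, hk, h1, jn, hjm, h2, h3⟩ := ih (i0 + 1) s h
      exact ⟨k + 1, by simp; omega, by omega, jn, hjm, h2, by simpa using h3⟩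

lemma mem_foodsOf (grid : List (List String)) (n m : Nat) (c : Int × Int) :
    c ∈ foodsOf grid n m ↔
      ∃ i : Nat, i < n ∧ ∃ j : Nat, j < m ∧ c = ((i : Int), (j : Int)) ∧
        (grid.getD i []).getD j "" = "#" := by
  simp only [foodsOf, List.mem_flatMap, List.mem_map]
  constructor
  · rintro ⟨i, hi, j, hj, rfl⟩
    simp at hi hj
    obtain ⟨b, ⟨hb, hpred⟩, rfl⟩ := hj
    exact ⟨i, hi, b, hb, rfl, by simpa using hpred⟩
  · rintro ⟨i, hi, j, hj, rfl, hcell⟩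
    refine ⟨i, by simpa using hi, (j : Int), ?_, rfl⟩
    simp
    exact ⟨hj, by simpa [List.getD_eq_getElem?_getD] using hcell⟩

-- under the precondition, food membership is exactly "in bounds and the cell reads '#'"
lemma mem_foodsOf_iff_cell (grid : List (List String)) (n m : Nat)
    (hn0 : grid.length = n) (hsh0 : ∀ row ∈ grid, m ≤ row.length) (c : Int × Int) :
    c ∈ foodsOf grid n m ↔
      (0 ≤ c.1 ∧ c.1 < (n : Int) ∧ 0 ≤ c.2 ∧ c.2 < (m : Int)) ∧
        cellD grid c.1 c.2 = "#" := by
  have hrow : ∀ i : Nat, i < n → m ≤ (grid.getD i []).length := by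
    intro i hi
    apply hsh0
    rw [List.getD_eq_getElem?_getD, List.getElem?_eq_getElem (by omega)]
    exact List.getElem_mem _
  rw [mem_foodsOf]
  constructor
  · rintro ⟨i, hi, j, hj, rfl, hcell⟩
    refine ⟨by simp; omega, ?_⟩
    rw [cellD_nonneg _ _ _ (by simp) (by simp)]
    simp only [Int.toNat_natCast]
    rw [List.getD_eq_getElem _ _ (by have := hrow i hi; omega)]
    rw [List.getD_eq_getElem _ _ (by have := hrow i hi; omega)] at hcell
    exact hcell
  · rintro ⟨⟨h1, h2, h3, h4⟩, hcell⟩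
    refine ⟨c.1.toNat, by omega, c.2.toNat, by omega, ?_, ?_⟩
    · obtain ⟨c1, c2⟩ := c; simp at h1 h3 ⊢; omega
    · rw [cellD_nonneg _ _ _ h1 h3] at hcell
      have hi : c.1.toNat < n := by omega
      rw [List.getD_eq_getElem _ _ (by have := hrow _ hi; omega)]
      rw [List.getD_eq_getElem _ _ (by have := hrow _ hi; omega)] at hcell
      exact hcell

-- the two solution predicates agree: reverse every witness path
lemma gsol_equiv (grid : List (List String)) (n m : Nat)
    (hn0 : grid.length = n) (hsh0 : ∀ row ∈ grid, m ≤ row.length)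
    (si sj : Int) (hsi0 : 0 ≤ si) (hsin : si < (n : Int)) (hsj0 : 0 ≤ sj)
    (hsjm : sj < (m : Int)) (hstar : cellD grid si sj = "*") (d : Nat) :
    GSol (okf grid n m) (tgtA grid) [(si, sj)] d ↔
      GSol (okf grid n m) (fun c => decide (c = (si, sj))) (foodsOf grid n m) d := by
  have hoks : okf grid n m (si, sj) = true := by
    simp only [okf, Bool.and_eq_true, decide_eq_true_eq]
    exact ⟨⟨hsi0, hsin, hsj0, hsjm⟩, by simp [hstar]⟩
  have hWA : ∀ c, (okf grid n m c = true ∧ tgtA grid c = false ∧ c ∉ [(si, sj)]) ↔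
      (okf grid n m c = true ∧ cellD grid c.1 c.2 ≠ "#" ∧ c ≠ (si, sj)) := by
    intro c
    simp [tgtA, beq_eq_false_iff_ne]
  have hWB : ∀ c, (okf grid n m c = true ∧ (fun c => decide (c = (si, sj))) c = false ∧
      c ∉ foodsOf grid n m) ↔
      (okf grid n m c = true ∧ cellD grid c.1 c.2 ≠ "#" ∧ c ≠ (si, sj)) := by
    intro c
    simp only [decide_eq_false_iff_not]
    constructor
    · rintro ⟨h1, h2, h3⟩
      refine ⟨h1, fun hc => ?_, h2⟩
      simp only [okf, Bool.and_eq_true, decide_eq_true_eq] at h1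
      exact h3 ((mem_foodsOf_iff_cell grid n m hn0 hsh0 c).2 ⟨h1.1, hc⟩)
    · rintro ⟨h1, h2, h3⟩
      refine ⟨h1, h3, fun hc => ?_⟩
      exact h2 ((mem_foodsOf_iff_cell grid n m hn0 hsh0 c).1 hc).2
  have hfoodmem : ∀ c, okf grid n m c = true → tgtA grid c = true → c ∈ foodsOf grid n m := by
    intro c h1 h2
    simp only [okf, Bool.and_eq_true, decide_eq_true_eq] at h1
    simp only [tgtA, beq_iff_eq] at h2
    exact (mem_foodsOf_iff_cell grid n m hn0 hsh0 c).2 ⟨h1.1, h2⟩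
  have hmemfood : ∀ c, c ∈ foodsOf grid n m →
      okf grid n m c = true ∧ tgtA grid c = true := by
    intro c hc
    obtain ⟨hb, hcell⟩ := (mem_foodsOf_iff_cell grid n m hn0 hsh0 c).1 hc
    constructor
    · simp only [okf, Bool.and_eq_true, decide_eq_true_eq]
      exact ⟨hb, by simp [hcell]⟩
    · simp [tgtA, hcell]
  constructor
  · rintro ⟨c', c, hP, hadj, hok, htgt⟩
    obtain ⟨u, hu, hL⟩ :=
      (preach_iff_linkT _ _ _ _ hWA d c').1 hP
    have hu' : u = (si, sj) := by simpa using hu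
    subst hu'
    have hPS := (linkM_iff_pathSpec _ d (si, sj) c).1 ⟨c', hL, hadj⟩
    have hPS' := pathSpec_rev _ _ _ _ hPS
    obtain ⟨c'', hL'', hadj''⟩ := (linkM_iff_pathSpec _ d c (si, sj)).2 hPS'
    refine ⟨c'', (si, sj),
      (preach_iff_linkT _ _ _ _ hWB d c'').2 ⟨c, hfoodmem c hok htgt, hL''⟩,
      hadj'', hoks, by simp⟩
  · rintro ⟨c', c, hP, hadj, hok, htgt⟩
    have hc : c = (si, sj) := by simpa using htgt
    subst hc
    obtain ⟨u, hu, hL⟩ :=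
      (preach_iff_linkT _ _ _ _ hWB d c').1 hP
    have hPS := (linkM_iff_pathSpec _ d u (si, sj)).1 ⟨c', hL, hadj⟩
    have hPS' := pathSpec_rev _ _ _ _ hPS
    obtain ⟨c'', hL'', hadj''⟩ := (linkM_iff_pathSpec _ d (si, sj) u).2 hPS'
    obtain ⟨hoku, htgtu⟩ := hmemfood u hu
    refine ⟨c'', u,
      (preach_iff_linkT _ _ _ _ hWA d c'').2 ⟨(si, sj), by simp, hL''⟩,
      hadj'', hoku, htgtu⟩

-- ===== VERDICT (by name: the statement is the Claim_ definition above) =====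
theorem getFood_spec : Claim_equal_getFood := by
  intro grid _ hpre
  obtain ⟨hne, hrows⟩ := hpre
  unfold Spec_getFood
  cases hs : findStartAux (grid.headD []).length grid 0 with
  | none =>
    simp only [getFood, getFood_alt, hs]
  | some s =>
    obtain ⟨si, sj⟩ := s
    obtain ⟨k, hk, hsi, jn, hjn, hsj, hcell⟩ := findStartAux_spec _ grid 0 _ hs
    dsimp only at hsi hsj
    simp only [zero_add] at hsi
    have hrowlen : ∀ i : Nat, i < grid.length → (grid.headD []).length ≤ (grid.getD i []).length := by
      intro i hi
      apply hrows
      rw [List.getD_eq_getElem?_getD, List.getElem?_eq_getElem (by omega)]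
      exact List.getElem_mem _
    have hstar : cellD grid si sj = "*" := by
      rw [cellD_nonneg _ _ _ (by omega) (by omega), hsi, hsj]
      simp only [Int.toNat_natCast]
      rw [List.getD_eq_getElem _ _ (by have := hrowlen k hk; omega)]
      rw [List.getD_eq_getElem _ _ (by have := hrowlen k hk; omega)] at hcell
      exact hcell
    have hsi0 : 0 ≤ si := by omega
    have hsin : si < (grid.length : Int) := by omega
    have hsj0 : 0 ≤ sj := by omega
    have hsjm : sj < ((grid.headD []).length : Int) := by omega
    set n := grid.length with hn
    set m := (grid.headD []).length with hm
    have hs' : findStartAux (grid.headD []).length grid 0 = some (si, sj) := by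
      rw [← hm]; exact hs
    have hoks : okf grid n m (si, sj) = true := by
      simp only [okf, Bool.and_eq_true, decide_eq_true_eq]
      exact ⟨⟨hsi0, hsin, hsj0, hsjm⟩, by simp [hstar]⟩
    -- A's run equals a gbfs run
    have hA : getFood grid =
        gbfs (okf grid n m) (tgtA grid) [(si, sj)] [(si, sj)] 0 (n * m + 1) := by
      have hM0 : Marks grid n m [] grid := ⟨shape_refl grid, by intro x y _ _ _ _; simp⟩
      have hM1 : Marks grid n m (PySem.Set.add [] (si, sj)) (mark grid si sj) :=
        marks_add grid n m hrows rfl [] grid si sj hM0 hsi0 hsin hsj0 hsjm rfl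
      have hM : Marks grid n m [(si, sj)] (mark grid si sj) := by
        simpa [PySem.Set.add] using hM1
      have hsim := loopA_sim grid n m hrows rfl (cellsList n m) (cellsList_length n m)
        (okf_mem_cells grid n m) (n * m + 1 + n * m) (n * m + 1) (n * m)
        (mark grid si sj) [(si, sj)] [] [(si, sj)] 0 rfl hM (by simp)
        (by
          intro c hc
          simp at hc
          subst hc
          exact (mem_cellsList n m _).2 ⟨hsi0, hsin, hsj0, hsjm⟩)
        (by simp; omega) (by simp)
      simp only [List.append_nil, List.length_cons, List.length_nil, Nat.zero_add] at hsim
      simp only [getFood, hs']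
      rw [gbfs.eq_def]
      simp only [List.isEmpty_cons, Bool.false_eq_true, if_false]
      exact hsim
    have hcharA := gbfs_char (okf grid n m) (tgtA grid) (cellsList n m) [(si, sj)]
      (okf_mem_cells grid n m)
      (by
        intro c hc
        simp at hc
        subst hc
        simp [tgtA, hstar])
      (n * m + 1) [(si, sj)] [(si, sj)] 0
      (by
        intro c
        rw [contains_true_iff]
        simp only [List.mem_singleton]
        constructor
        · intro h; exact ⟨0, le_refl _, by simpa [PReach] using h⟩
        · rintro ⟨j, hj, hP⟩
          have : j = 0 := Nat.le_zero.1 hj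
          subst this
          simpa [PReach] using hP)
      (by
        intro c
        simp only [List.mem_singleton, PReach]
        constructor
        · intro h; exact ⟨by simpa using h, fun j hj => absurd hj (by omega)⟩
        · rintro ⟨h, -⟩; simpa using h)
      (by simp) 
      (by
        intro c hc
        simp at hc
        subst hc
        exact (mem_cellsList n m _).2 ⟨hsi0, hsin, hsj0, hsjm⟩)
      (by intro _; rw [cellsList_length]; simp)
      (by intro j hj; omega)
    simp only [Nat.cast_zero] at hcharA
    rw [← hA] at hcharA
    -- B's run
    have hB : getFood_alt grid =
        gbfs (okf grid n m) (fun c => decide (c = (si, sj)))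
          (PySem.Set.ofList (foodsOf grid n m)) (foodsOf grid n m) 0 (n * m + 1) := by
      simp only [getFood_alt, hs']
      rfl
    have hcharB := gbfs_char (okf grid n m) (fun c => decide (c = (si, sj)))
      (cellsList n m) (foodsOf grid n m)
      (okf_mem_cells grid n m)
      (by
        intro c hc
        obtain ⟨-, hcell'⟩ := (mem_foodsOf_iff_cell grid n m rfl hrows c).1 hc
        simp only [decide_eq_false_iff_not]
        intro hceq
        subst hceq
        rw [hstar] at hcell'
        simp at hcell')
      (n * m + 1) (PySem.Set.ofList (foodsOf grid n m)) (foodsOf grid n m) 0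
      (by
        intro c
        rw [contains_true_iff]
        rw [PySem.Set.mem_ofList]
        constructor
        · intro h; exact ⟨0, le_refl _, by simpa [PReach] using h⟩
        · rintro ⟨j, hj, hP⟩
          have : j = 0 := Nat.le_zero.1 hj
          subst this
          simpa [PReach] using hP)
      (by
        intro c
        simp only [PReach]
        constructor
        · intro h; exact ⟨h, fun j hj => absurd hj (by omega)⟩
        · rintro ⟨h, -⟩; exact h)
      (PySem.Set.nodup_ofList _)
      (by
        intro c hc
        rw [PySem.Set.mem_ofList] at hc
        obtain ⟨hb, -⟩ := (mem_foodsOf_iff_cell grid n m rfl hrows c).1 hc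
        exact (mem_cellsList n m c).2 hb)
      (by intro _; rw [cellsList_length]; simp)
      (by intro j hj; omega)
    simp only [Nat.cast_zero] at hcharB
    rw [← hB] at hcharB
    have hGS := gsol_equiv grid n m rfl hrows si sj hsi0 hsin hsj0 hsjm hstar
    exact LeastSpec_unique (LeastSpec_congr hGS hcharA) hcharB
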